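-- pv_equiv track=rewrite | github.com/mchi19/Python-Bash-Scripting | Project 3/simpleTasks.py | getStreaks
-- ===== SOURCE A (Python) =====
-- def getStreaks(sequence, letters):
--     res = []
--     llen = len(letters)
--     slen = len(sequence)
--     x = 0
--     flag = 1
--     temp = []
--     while x < slen:
--         if sequence[x] in letters:
--             if flag == 1:
--                 prev = sequence[x]
--                 temp.append(sequence[x])
--                 flag = 0
--             else:
--                 if sequence[x] == prev:
--                     temp.append(sequence[x])
--                 else:
--                     streak = "".join(temp)
--                     res.append(streak)
--                     temp = []
--                     temp.append(sequence[x])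
--                     prev = sequence[x]
--         else:
--             prev = sequence[x]
--         x += 1
--     if not temp:
--         return res
--     streak = "".join(temp)
--     res.append(streak)
--     return res
-- ===== SOURCE B (Python) =====
-- def getStreaks(sequence, letters):
--     res = []
--     i, n = 0, len(sequence)
--     while i < n:
--         j = i + 1
--         while j < n and sequence[j] == sequence[i]:
--             j += 1
--         if sequence[i] in letters:
--             res.append(sequence[i] * (j - i))
--         i = j
--     return res
-- ===== Notes on version B (the rewrite author's own statement) =====
-- stated objective: simpler
-- what changed: Replaced A's flag/prev/temp state machine with a two-pointer scan over maximal runs of equal characters, emitting char*(run length) for allowed characters.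
import Mathlib
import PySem

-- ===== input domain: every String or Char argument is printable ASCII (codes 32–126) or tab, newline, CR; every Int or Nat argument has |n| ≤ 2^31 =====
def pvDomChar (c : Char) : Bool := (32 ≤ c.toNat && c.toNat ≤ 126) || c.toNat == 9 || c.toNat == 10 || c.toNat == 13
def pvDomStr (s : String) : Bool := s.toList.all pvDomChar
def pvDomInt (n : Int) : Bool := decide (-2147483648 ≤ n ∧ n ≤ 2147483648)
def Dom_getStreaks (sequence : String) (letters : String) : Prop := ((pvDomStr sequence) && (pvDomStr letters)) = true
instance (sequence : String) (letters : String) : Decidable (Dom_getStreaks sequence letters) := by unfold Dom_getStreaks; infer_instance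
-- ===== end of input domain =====

-- B replaces A's flag/prev/temp state machine by a scan over maximal runs of equal
-- characters (simpler decomposition; same behaviour, same asymptotic cost).

-- ===== PORT A =====
-- state: (res, flag, temp, prev); Python's `prev` is unassigned until first written,
-- but it is only read after an assignment (flag = 0 requires one), so a dummy ' ' init is faithful.
def getStreaksStep (ls : List Char) (st : List String × Nat × List Char × Char) (c : Char) :
    List String × Nat × List Char × Char :=
  let res := st.1; let flag := st.2.1; let temp := st.2.2.1; let prev := st.2.2.2
  if ls.contains c then
    if flag = 1 then (res, 0, temp ++ [c], c)
    else if c = prev then (res, flag, temp ++ [c], prev)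
    else (res ++ [String.ofList temp], flag, [c], c)
  else (res, flag, temp, c)

def getStreaksFin (p : List String × Nat × List Char × Char) : List String :=
  if p.2.2.1 = [] then p.1 else p.1 ++ [String.ofList p.2.2.1]

def getStreaks (sequence : String) (letters : String) : List String :=
  getStreaksFin (sequence.toList.foldl (getStreaksStep letters.toList) ([], 1, [], ' '))

-- ===== PORT B =====
-- Source B's outer loop over run starts; the inner `while sequence[j] == sequence[i]` scan is takeWhile/dropWhile,
-- and `sequence[i] * (j - i)` is the replicate.
def altGo (ls : List Char) : List Char → List String
  | [] => []
  | c :: rest =>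
    let run := rest.takeWhile (fun d => d = c)
    let rest' := rest.dropWhile (fun d => d = c)
    if ls.contains c then String.ofList (List.replicate (1 + run.length) c) :: altGo ls rest'
    else altGo ls rest'
termination_by l => l.length
decreasing_by
  all_goals
    simp only [List.length_cons]
    exact Nat.lt_succ_of_le (List.length_dropWhile_le _ _)

def getStreaks_alt (sequence : String) (letters : String) : List String :=
  altGo letters.toList sequence.toList

-- ===== PRECONDITION & SPEC =====
def Spec_getStreaks (sequence : String) (letters : String) (out : List String) : Prop := out = getStreaks_alt sequence letters
instance (sequence : String) (letters : String) (out : List String) : Decidable (Spec_getStreaks sequence letters out) := by unfold Spec_getStreaks; infer_instance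

-- ===== CLAIM (what is proved, stated in full; the proofs are below) =====
def Claim_equal_getStreaks : Prop := ∀ (sequence : String) (letters : String), Dom_getStreaks sequence letters → Spec_getStreaks sequence letters (getStreaks sequence letters)

-- ===== LEMMAS AND PROOFS =====

-- altGo skips a disallowed character one at a time
theorem altGo_skip (ls : List Char) (c : Char) (rest : List Char) (hc : c ∉ ls) :
    altGo ls (c :: rest) = altGo ls rest := by
  cases rest with
  | nil => simp [altGo, hc]
  | cons d t =>
    by_cases hd : d = c
    · subst hd; simp [altGo, hc]
    · simp [altGo, hc, hd]

-- the three reachable shapes of A's loop state, and what the finished loop returns in each: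
-- (a) flag=1, temp=[]  : nothing pending, A behaves like altGo from here;
-- (b) flag=0, temp a nonempty run of an allowed t, prev=t : pending run may merge with a leading run of t;
-- (c) flag=0, temp nonempty, prev disallowed : pending run flushes as its own streak.
theorem getStreaks_main (ls : List Char) (cs : List Char) :
    (∀ (res : List String) (p : Char),
        getStreaksFin (cs.foldl (getStreaksStep ls) (res, 1, [], p)) = res ++ altGo ls cs) ∧
    (∀ (res : List String) (m : Nat) (t : Char), t ∈ ls →
        getStreaksFin (cs.foldl (getStreaksStep ls) (res, 0, List.replicate (m + 1) t, t)) =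
          res ++ [String.ofList (List.replicate (m + 1 + (cs.takeWhile (fun d => d = t)).length) t)] ++
            altGo ls (cs.dropWhile (fun d => d = t))) ∧
    (∀ (res : List String) (temp : List Char) (prev : Char),
        prev ∉ ls → temp ≠ [] →
        getStreaksFin (cs.foldl (getStreaksStep ls) (res, 0, temp, prev)) =
          res ++ [String.ofList temp] ++ altGo ls cs) := by
  induction cs with
  | nil =>
    refine ⟨?_, ?_, ?_⟩
    · intro res p; simp [getStreaksFin, altGo]
    · intro res m t _; simp [getStreaksFin, altGo, List.replicate]
    · intro res temp prev _ ht; simp [getStreaksFin, altGo, ht]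
  | cons c rest ih =>
    obtain ⟨iha, ihb, ihc⟩ := ih
    refine ⟨?_, ?_, ?_⟩
    · -- (a) flag=1, temp=[]
      intro res p
      by_cases hc : c ∈ ls
      · have h1 := ihb res 0 c hc
        simp only [Nat.zero_add, List.replicate_one] at h1
        simp [getStreaksStep, List.contains_eq_mem, hc, altGo, h1]
      · have h1 := iha res c
        simp [getStreaksStep, List.contains_eq_mem, hc, h1, altGo_skip ls c rest hc]
    · -- (b) clean pending run of t
      intro res m t ht
      by_cases hct : c = t
      · subst hct
        have h1 := ihb res (m + 1) c ht
        have hrep : List.replicate (m + 1) c ++ [c] = List.replicate (m + 1 + 1) c :=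
          List.replicate_succ'.symm
        simp [getStreaksStep, List.contains_eq_mem, ht, hrep, h1]
        ring_nf
      · by_cases hc : c ∈ ls
        · have h1 := ihb (res ++ [String.ofList (List.replicate (m + 1) t)]) 0 c hc
          simp only [Nat.zero_add, List.replicate_one] at h1
          simp [getStreaksStep, List.contains_eq_mem, hc, hct, h1, altGo]
        · have hct' : c ≠ t := hct
          have h1 := ihc res (List.replicate (m + 1) t) c hc (by simp)
          simp [getStreaksStep, List.contains_eq_mem, hc, h1, altGo_skip ls c rest hc, hct']
    · -- (c) dirty pending temp, prev disallowed
      intro res temp prev hp htemp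
      by_cases hc : c ∈ ls
      · have hcp : c ≠ prev := fun h => hp (h ▸ hc)
        have h1 := ihb (res ++ [String.ofList temp]) 0 c hc
        simp only [Nat.zero_add, List.replicate_one] at h1
        simp [getStreaksStep, List.contains_eq_mem, hc, hcp, h1, altGo]
      · have h1 := ihc res temp c hc htemp
        simp [getStreaksStep, List.contains_eq_mem, hc, h1, altGo_skip ls c rest hc]

-- ===== VERDICT (by name: the statement is the Claim_ definition above) =====
theorem getStreaks_spec : Claim_equal_getStreaks := by
  intro sequence letters _
  unfold Spec_getStreaks getStreaks getStreaks_alt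
  simpa using (getStreaks_main letters.toList sequence.toList).1 [] ' '
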